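-- pv_equiv track=rewrite | github.com/YSZhuoyang/Data-structures-and-algorithms | Py_solution/convertStrByReplacingLetters.py | convert
-- ===== SOURCE A (Python) =====
-- def convert(s, t):
--     if len(s) != len(t):
--         return False
--
--     # Count number of placeholders can be used for replacement dependency cycles
--     numUniChars = set(s)
--     numPlaceholders = 26 - len(numUniChars)
--
--     dep = [None] * 26
--     # Build replacement dependency graph
--     for i in range(len(s)):
--         cs, ct = ord(s[i]) - ord('a'), ord(t[i]) - ord('a')
--         if cs != ct:
--             if dep[cs] != None and dep[cs] != ct:
--                 # Dependency conflicts
--                 return False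
--
--             dep[cs] = ct
--
--     # Count dependency cycles and deduce placeholder counter
--     visited = [False] * 26
--     for c in numUniChars:
--         source = ord(c) - ord('a')
--         path = [False] * 26
--         path[source] = True
--         while not visited[source] and dep[source] != None:
--             visited[source] = True
--             dest = dep[source]
--             if path[dest]:
--                 # Cycle detected
--                 numPlaceholders -= 1
--                 if numPlaceholders < 0:
--                     # All placeholders are used up
--                     return False
--             else:
--                 path[dest] = True
--
--             source = dest
--
--     return True
-- ===== SOURCE B (Python) =====
-- def convert(s, t):
--     if len(s) != len(t):
--         return False
--     # Phase 1: build the replacement graph as a dict, rejecting conflicts.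
--     dep = {}
--     for a, b in zip(s, t):
--         if a != b:
--             u, v = ord(a) - 97, ord(b) - 97
--             if dep.setdefault(u, v) != v:
--                 return False
--     # Phase 2: count the cycles of the functional graph, once each
--     # (a cycle is counted at its smallest node).
--     cycles = 0
--     for u in dep:
--         seen = []
--         w = u
--         while w in dep and w not in seen:
--             seen.append(w)
--             w = dep[w]
--         if w == u and u == min(seen):
--             cycles += 1
--     # Phase 3: one closed-form comparison with the free placeholders.
--     return cycles <= 26 - len(set(s))
-- ===== Notes on version B (the rewrite author's own statement) =====
-- stated objective: simpler
-- what changed: Replaces A's stateful visited/path array traversal with its in-loop placeholder decrement and early False-returns by three independent phases: a dict-based conflict-checked graph build that skips equal character pairs, counting each cycle exactly once at its minimal node by plain orbit-following, and a single closed-form comparison against 26 - len(set(s)).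
-- outside the precondition, e.g. on convert('aG', 'ba'): A returns False, B returns True; on convert('a', '{'): A raises IndexError, B returns True
import Mathlib
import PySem

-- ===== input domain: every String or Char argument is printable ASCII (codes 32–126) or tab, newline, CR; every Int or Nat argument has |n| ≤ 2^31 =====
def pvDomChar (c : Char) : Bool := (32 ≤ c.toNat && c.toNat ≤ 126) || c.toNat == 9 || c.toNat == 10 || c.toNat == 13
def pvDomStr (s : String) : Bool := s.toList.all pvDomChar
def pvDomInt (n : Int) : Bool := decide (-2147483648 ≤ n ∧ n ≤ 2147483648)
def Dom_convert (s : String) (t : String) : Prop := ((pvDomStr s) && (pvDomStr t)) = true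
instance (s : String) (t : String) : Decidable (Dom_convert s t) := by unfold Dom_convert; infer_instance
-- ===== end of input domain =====

-- B replaces A's single stateful traversal (visited/path arrays, in-loop placeholder
-- decrement, early returns) by three separate phases: dict graph build, counting each
-- cycle once at its minimal node by orbit-following, and one closed-form comparison.

-- ===== PORT A =====
-- for i in range(len(s)): build dep[] with the conflict check (lengths are equal here,
-- so the index loop is rendered as parallel structural recursion on the two char lists).
-- 'none' result = the in-loop 'return False' (inside Pre_ no IndexError can occur).
def convertBuild : List Char → List Char → List (Option Int) → Option (List (Option Int))
  | c :: cs, d :: ds, dep =>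
    let ci : Int := (c.toNat : Int) - 97
    let ti : Int := (d.toNat : Int) - 97
    if ci ≠ ti then
      if PySem.List.pyGetD dep ci none ≠ none ∧ PySem.List.pyGetD dep ci none ≠ some ti then
        none
      else convertBuild cs ds (PySem.List.pySetD dep ci (some ti))
    else convertBuild cs ds dep
  | _, _, dep => some dep

-- the inner 'while not visited[source] and dep[source] != None' loop; each iteration
-- marks an unvisited slot of the 26 visited[], so fuel 27 is never exhausted inside Pre_.
def convertChase (dep : List (Option Int)) : Nat → List Bool → List Bool → Int → Int →
    (List Bool × Int × Bool)
  | 0, visited, _, _, np => (visited, np, false)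
  | fuel+1, visited, path, source, np =>
    if PySem.List.pyGetD visited source false = false ∧ PySem.List.pyGetD dep source none ≠ none then
      let visited' := PySem.List.pySetD visited source true
      let dest := (PySem.List.pyGetD dep source none).getD 0
      if PySem.List.pyGetD path dest false then
        if np - 1 < 0 then (visited', np - 1, true)
        else convertChase dep fuel visited' path dest (np - 1)
      else convertChase dep fuel visited' (PySem.List.pySetD path dest true) dest np
    else (visited, np, false)

-- 'for c in numUniChars:' — the outer loop; true/false is A's final return value.
def convertOuter (dep : List (Option Int)) : List Char → List Bool → Int → Bool
  | [], _, _ => true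
  | c :: cs, visited, np =>
    let source : Int := (c.toNat : Int) - 97
    let path := PySem.List.pySetD (List.replicate 26 false) source true
    match convertChase dep 27 visited path source np with
    | (visited', np', early) => if early then false else convertOuter dep cs visited' np'

def convert (s : String) (t : String) : Bool :=
  if PySem.Str.len s ≠ PySem.Str.len t then false
  else
    let uni : PySem.Set Char := PySem.Set.ofList s.toList
    let np : Int := 26 - (uni.length : Int)
    match convertBuild s.toList t.toList (List.replicate 26 none) with
    | none => false
    | some dep => convertOuter dep uni (List.replicate 26 false) np

-- ===== PORT B =====
-- phase 1 of Source B: dict build with setdefault and the conflict early-False ('none').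
def convertAltBuild : List (Char × Char) → PySem.Dict Int Int → Option (PySem.Dict Int Int)
  | [], d => some d
  | (a, b) :: ps, d =>
    if a ≠ b then
      let u : Int := (a.toNat : Int) - 97
      let v : Int := (b.toNat : Int) - 97
      let got : Int := (d.get? u).getD v          -- dep.setdefault(u, v), the returned value
      if got ≠ v then none else convertAltBuild ps (d.setdefault u v)
    else convertAltBuild ps d

-- 'while w in dep and w not in seen: seen.append(w); w = dep[w]' — each iteration adds a
-- distinct key to seen, so fuel size+1 is never exhausted.
def convertAltOrbit (d : PySem.Dict Int Int) : Nat → List Int → Int → (List Int × Int)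
  | 0, seen, w => (seen, w)
  | fuel+1, seen, w =>
    if d.contains w ∧ w ∉ seen then
      convertAltOrbit d fuel (seen ++ [w]) (d.getD w 0)
    else (seen, w)

-- the body of Source B's counting loop: 'if w == u and u == min(seen)'
def convertAltRep (d : PySem.Dict Int Int) (u : Int) : Bool :=
  let r := convertAltOrbit d (d.items.length + 1) [] u
  decide (r.2 = u ∧ PySem.List.min? r.1 id = some u)

def convertAltCount (d : PySem.Dict Int Int) : Int :=
  d.keys.foldl (fun acc u => if convertAltRep d u then acc + 1 else acc) 0

def convert_alt (s : String) (t : String) : Bool :=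
  if PySem.Str.len s ≠ PySem.Str.len t then false
  else
    match convertAltBuild (s.toList.zip t.toList) PySem.Dict.empty with
    | none => false
    | some d =>
      decide (convertAltCount d ≤ 26 - ((PySem.Set.ofList s.toList).length : Int))

-- ===== PRECONDITION & SPEC =====
-- Pre_ restricts equal-length inputs to lowercase a-z, the task's natural domain: outside
-- it A either raises IndexError or its value depends on accidental negative-index
-- wraparound of the 26-slot arrays (ord(c)-97 < 0); B does the natural thing there.
def Pre_convert (s : String) (t : String) : Prop :=
  PySem.Str.len s ≠ PySem.Str.len t ∨
    ((s.toList ++ t.toList).all (fun c => 97 ≤ c.toNat && c.toNat ≤ 122) = true)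
instance (s : String) (t : String) : Decidable (Pre_convert s t) := by
  unfold Pre_convert; infer_instance

def pvWitness_convert : String × String := ("ab", "bc")

def Spec_convert (s : String) (t : String) (out : Bool) : Prop := out = convert_alt s t
instance (s : String) (t : String) (out : Bool) : Decidable (Spec_convert s t out) := by
  unfold Spec_convert; infer_instance

-- ===== CLAIM (what is proved, stated in full; the proofs are below) =====
def Claim_equal_convert : Prop :=
  ∀ (s : String) (t : String), Dom_convert s t → Pre_convert s t → Spec_convert s t (convert s t)

-- ===== LEMMAS AND PROOFS =====

-- ---------- proof-level notions ----------

def bvGet (V : List Bool) (x : Int) : Bool := PySem.List.pyGetD V x false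

def StepR (d : PySem.Dict Int Int) (a b : Int) : Prop := d.get? a = some b

-- a walk l whose consecutive elements step via d, the last one stepping to z
def WalkD (d : PySem.Dict Int Int) (l : List Int) (z : Int) : Prop :=
  List.IsChain (StepR d) (l ++ [z])

def GoodD (d : PySem.Dict Int Int) : Prop :=
  d.keys.Nodup ∧ ∀ k v, d.get? k = some v → 0 ≤ k ∧ k < 26 ∧ 0 ≤ v ∧ v < 26

def RelDep (dep : List (Option Int)) (d : PySem.Dict Int Int) : Prop :=
  dep.length = 26 ∧ ∀ x : Int, 0 ≤ x → PySem.List.pyGetD dep x none = d.get? x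

def ClosureV (d : PySem.Dict Int Int) (V : List Bool) : Prop :=
  ∀ x y : Int, bvGet V x = true → d.get? x = some y →
    (bvGet V y = true ∨ d.contains y = false)

def cyclesLeftN (d : PySem.Dict Int Int) (V : List Bool) : Nat :=
  d.keys.countP (fun u => convertAltRep d u && !bvGet V u)

def unvis (vis : List Bool) : Nat :=
  (List.range 26).countP (fun (n : Nat) => !bvGet vis ((n : Nat) : Int))

def lcChar (c : Char) : Prop := 97 ≤ c.toNat ∧ c.toNat ≤ 122

-- ---------- small helpers ----------

theorem res_range (c : Char) (h : lcChar c) :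
    0 ≤ (c.toNat : Int) - 97 ∧ (c.toNat : Int) - 97 < 26 := by
  unfold lcChar at h; omega

theorem res_inj (a b : Char) :
    ((a.toNat : Int) - 97 ≠ (b.toNat : Int) - 97) ↔ a ≠ b := by
  constructor
  · intro h he; exact h (by rw [he])
  · intro h he
    have h1 : a.toNat = b.toNat := by omega
    have h2 : a.val.toNat = b.val.toNat := h1
    exact h (Char.ext (UInt32.toNat_inj.mp h2))

theorem bv_replicate26 (x : Int) : bvGet (List.replicate 26 false) x = false := by
  unfold bvGet PySem.List.pyGetD
  cases hx : PySem.List.pyGet? (List.replicate 26 false) x with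
  | none => rfl
  | some b =>
    have hb := PySem.List.mem_of_pyGet?_eq_some _ hx
    have : b = false := List.eq_of_mem_replicate hb
    rw [this]; rfl

theorem bv_set (V : List Bool) (hV : V.length = 26) (w x : Int)
    (hw0 : 0 ≤ w) (hw : w < 26) (hx : 0 ≤ x) :
    bvGet (PySem.List.pySetD V w true) x = (if x = w then true else bvGet V x) := by
  unfold bvGet
  have hw' : w = ((w.toNat : Nat) : Int) := (Int.toNat_of_nonneg hw0).symm
  have hx' : x = ((x.toNat : Nat) : Int) := (Int.toNat_of_nonneg hx).symm
  rw [hw', hx', PySem.List.pyGetD_pySetD_natCast _ _ _ _ _ (by omega)]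
  by_cases h : x.toNat = w.toNat
  · rw [if_pos h, if_pos (by exact_mod_cast h)]
  · rw [if_neg h, if_neg (by exact_mod_cast h)]

theorem pyGetD_set_int {α : Type} (xs : List α) (hlen : xs.length = 26) (w x : Int)
    (dd v : α) (hw0 : 0 ≤ w) (hw : w < 26) (hx : 0 ≤ x) :
    PySem.List.pyGetD (PySem.List.pySetD xs w v) x dd
      = if x = w then v else PySem.List.pyGetD xs x dd := by
  have hw' : w = ((w.toNat : Nat) : Int) := (Int.toNat_of_nonneg hw0).symm
  have hx' : x = ((x.toNat : Nat) : Int) := (Int.toNat_of_nonneg hx).symm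
  rw [hw', hx', PySem.List.pyGetD_pySetD_natCast _ _ _ _ _ (by omega)]
  by_cases h : x.toNat = w.toNat
  · rw [if_pos h, if_pos (by exact_mod_cast h)]
  · rw [if_neg h, if_neg (by exact_mod_cast h)]


theorem countP_flip {α : Type} (K : List α) (hnd : K.Nodup) (r : α) (hr : r ∈ K)
    (f g : α → Bool) (hf : f r = true) (hg : g r = false)
    (hfg : ∀ x ∈ K, x ≠ r → f x = g x) :
    K.countP f = K.countP g + 1 := by
  induction K with
  | nil => cases hr
  | cons a K ih =>
    have hnd' := List.nodup_cons.mp hnd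
    rcases List.mem_cons.mp hr with h | h
    · have hK : ∀ x ∈ K, (f x = true) ↔ (g x = true) := by
        intro x hx
        have : f x = g x := by
          refine hfg x (List.mem_cons_of_mem _ hx) ?_
          intro he; rw [← h] at hnd'; exact hnd'.1 (he ▸ hx)
        rw [this]
      rw [← h]
      simp [hf, hg, List.countP_congr hK]
    · have hna : a ≠ r := by
        intro he; subst he; exact hnd'.1 h
      have hrec := ih hnd'.2 h
        (fun x hx hxr => hfg x (List.mem_cons_of_mem _ hx) hxr)
      have ha := hfg a (List.mem_cons_self) hna
      simp only [List.countP_cons, ha, hrec]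
      omega

theorem nodup_lc_le26 (l : List Char) (hnd : l.Nodup) (hlc : ∀ c ∈ l, lcChar c) :
    l.length ≤ 26 := by
  have hinj : Function.Injective Char.toNat := by
    intro a b h; exact Char.ext (UInt32.toNat_inj.mp h)
  have h1 : (l.map Char.toNat).Nodup := hnd.map hinj
  have h2 : l.map Char.toNat ⊆ List.range' 97 26 := by
    intro x hx
    rcases List.mem_map.mp hx with ⟨c, hc, rfl⟩
    have := hlc c hc
    unfold lcChar at this
    rw [List.mem_range'_1]
    omega
  have h3 := (List.subperm_of_subset h1 h2).length_le
  simpa using h3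

theorem unvis_le (vis : List Bool) : unvis vis ≤ 26 := by
  unfold unvis
  exact le_trans List.countP_le_length (by simp)

theorem unvis_dec (vis : List Bool) (hlen : vis.length = 26) (w : Int)
    (hw0 : 0 ≤ w) (hw : w < 26) (hvw : bvGet vis w = false) :
    unvis (PySem.List.pySetD vis w true) + 1 = unvis vis := by
  have hr : w.toNat ∈ List.range 26 := by
    rw [List.mem_range]; omega
  have key : (List.range 26).countP (fun (n : Nat) => !bvGet vis ((n : Nat) : Int))
      = (List.range 26).countP (fun (n : Nat) => !bvGet (PySem.List.pySetD vis w true) ((n : Nat) : Int)) + 1 := by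
    refine countP_flip _ List.nodup_range w.toNat hr _ _ ?_ ?_ ?_
    · show (!bvGet vis ((w.toNat : Nat) : Int)) = true
      rw [Int.toNat_of_nonneg hw0, hvw]; rfl
    · show (!bvGet (PySem.List.pySetD vis w true) ((w.toNat : Nat) : Int)) = false
      rw [Int.toNat_of_nonneg hw0, bv_set vis hlen w w hw0 hw hw0]
      simp
    · intro x hx hxw
      show (!bvGet vis ((x : Nat) : Int)) = (!bvGet (PySem.List.pySetD vis w true) ((x : Nat) : Int))
      rw [bv_set vis hlen w ((x : Nat) : Int) hw0 hw (by positivity)]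
      have : ¬(((x : Nat) : Int) = w) := by omega
      simp [this]
  unfold unvis
  omega

theorem min?_int_iff (l : List Int) (m : Int) :
    PySem.List.min? l id = some m ↔ m ∈ l ∧ ∀ y ∈ l, m ≤ y := by
  constructor
  · intro h
    exact ⟨PySem.List.min?_mem h, fun y hy => PySem.List.min?_isMin h y hy⟩
  · rintro ⟨hm, hmin⟩
    have hne : l ≠ [] := by intro he; subst he; cases hm
    cases hmn : PySem.List.min? l id with
    | none => exact absurd ((PySem.List.min?_eq_none_iff l id).mp hmn) hne
    | some m' =>
      have h1 := PySem.List.min?_mem hmn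
      have h2 := PySem.List.min?_isMin hmn m hm
      have h3 := hmin m' h1
      have : m' = m := le_antisymm (by simpa using h2) (by simpa using h3)
      rw [this]

-- ---------- walk facts ----------

theorem step_contains (d : PySem.Dict Int Int) (a b : Int) (h : d.get? a = some b) :
    d.contains a = true := by
  cases hc : d.contains a with
  | true => rfl
  | false => rw [(PySem.Dict.get?_eq_none_iff_contains d a).mpr hc] at h; cases h

theorem contains_some (d : PySem.Dict Int Int) (a : Int) (h : d.contains a = true) :
    ∃ b, d.get? a = some b := by
  cases hg : d.get? a with
  | none => rw [(PySem.Dict.get?_eq_none_iff_contains d a).mp hg] at h; cases h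
  | some b => exact ⟨b, rfl⟩

theorem walk_head_step (d : PySem.Dict Int Int) (a : Int) (l : List Int) (z : Int)
    (h : WalkD d (a :: l) z) :
    ∃ y, d.get? a = some y ∧ ((l = [] ∧ y = z) ∨ l.head? = some y) := by
  unfold WalkD at h
  cases l with
  | nil =>
    have h' : List.IsChain (StepR d) [a, z] := by simpa using h
    exact ⟨z, (List.isChain_cons_cons.mp h').1, Or.inl ⟨rfl, rfl⟩⟩
  | cons b l' =>
    have h' : List.IsChain (StepR d) (a :: b :: (l' ++ [z])) := by simpa using h
    exact ⟨b, (List.isChain_cons_cons.mp h').1, Or.inr rfl⟩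

theorem walk_suffix (d : PySem.Dict Int Int) (l₁ l₂ : List Int) (z : Int)
    (h : WalkD d (l₁ ++ l₂) z) : WalkD d l₂ z := by
  unfold WalkD at *
  rw [List.append_assoc] at h
  exact (List.isChain_append.mp h).2.1

-- rotation of a cycle: from a cycle through `a` we get a cycle through any member x
theorem walk_rotate (d : PySem.Dict Int Int) (a : Int) (l l₁ l₂ : List Int) (x : Int)
    (h : WalkD d (a :: l) a) (hsplit : a :: l = l₁ ++ x :: l₂) :
    WalkD d (x :: (l₂ ++ l₁)) x := by
  cases l₁ with
  | nil =>
    simp only [List.nil_append] at hsplit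
    cases hsplit
    simpa using h
  | cons a₀ l₁' =>
    have ha : a = a₀ := by
      have := congrArg List.head? hsplit
      simpa using this
    subst ha
    have hl : l = l₁' ++ x :: l₂ := by
      have := congrArg List.tail hsplit
      simpa using this
    subst hl
    unfold WalkD at *
    have h' : List.IsChain (StepR d) ((a :: l₁') ++ ((x :: l₂) ++ [a])) := by
      simpa using h
    obtain ⟨c1, c2, link⟩ := List.isChain_append.mp h'
    obtain ⟨c2a, _, link2⟩ := List.isChain_append.mp c2
    have goal : List.IsChain (StepR d) ((x :: l₂) ++ ((a :: l₁') ++ [x])) := by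
      refine List.isChain_append.mpr ⟨c2a, ?_, ?_⟩
      · refine List.isChain_append.mpr ⟨c1, List.isChain_singleton _, ?_⟩
        intro p hp q hq
        simp only [List.head?_cons, Option.mem_def, Option.some.injEq] at hq
        subst hq
        exact link p hp x (by simp)
      · intro p hp q hq
        simp only [List.cons_append, List.head?_cons, Option.mem_def, Option.some.injEq] at hq
        subst hq
        exact link2 p hp a (by simp)
    simpa using goal

theorem walk_contains (d : PySem.Dict Int Int) (l : List Int) (z : Int)
    (h : WalkD d l z) : ∀ x ∈ l, d.contains x = true := by
  intro x hx
  rcases List.append_of_mem hx with ⟨s, t, rfl⟩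
  have h2 := walk_suffix d s (x :: t) z h
  rcases walk_head_step d x t z h2 with ⟨y, hy, _⟩
  exact step_contains d x y hy

theorem walk_succ (d : PySem.Dict Int Int) (l : List Int) (z : Int)
    (h : WalkD d l z) : ∀ x ∈ l, ∃ y, d.get? x = some y ∧ (y ∈ l ∨ y = z) := by
  intro x hx
  rcases List.append_of_mem hx with ⟨s, t, rfl⟩
  have h2 := walk_suffix d s (x :: t) z h
  rcases walk_head_step d x t z h2 with ⟨y, hy, hcase⟩
  refine ⟨y, hy, ?_⟩
  rcases hcase with ⟨_, rfl⟩ | hh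
  · exact Or.inr rfl
  · left
    have : y ∈ t := List.mem_of_mem_head? hh
    exact List.mem_append.mpr (Or.inr (List.mem_cons_of_mem _ this))

theorem walk_snoc (d : PySem.Dict Int Int) (l : List Int) (w v : Int)
    (h : WalkD d l w) (hs : d.get? w = some v) : WalkD d (l ++ [w]) v := by
  unfold WalkD at *
  refine List.isChain_append.mpr ⟨h, List.isChain_singleton _, ?_⟩
  intro p hp q hq
  simp only [List.head?_cons, Option.mem_def, Option.some.injEq] at hq
  have hlast : (l ++ [w]).getLast? = some w := by simp
  rw [hlast] at hp
  simp only [Option.mem_def, Option.some.injEq] at hp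
  subst hp; subst hq
  exact hs

-- ---------- orbit (port B's while loop) ----------

theorem orbit_stop (d : PySem.Dict Int Int) (fuel : Nat) (seen : List Int) (w : Int)
    (h : d.contains w = false ∨ w ∈ seen) :
    convertAltOrbit d fuel seen w = (seen, w) := by
  cases fuel with
  | zero => rfl
  | succ n =>
    show (if d.contains w ∧ w ∉ seen then _ else (seen, w)) = (seen, w)
    rw [if_neg]
    rintro ⟨h1, h2⟩
    rcases h with hc | hc
    · rw [hc] at h1; cases h1
    · exact h2 hc

theorem orbit_run (d : PySem.Dict Int Int) :
    ∀ (l : List Int) (z : Int) (fuel : Nat) (seen : List Int) (w : Int),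
    WalkD d l z → l.Nodup → (∀ x ∈ l, x ∉ seen) → l.length ≤ fuel →
    l.head? = some w →
    convertAltOrbit d fuel seen w = convertAltOrbit d (fuel - l.length) (seen ++ l) z := by
  intro l
  induction l with
  | nil => intro z fuel seen w _ _ _ _ hh; cases hh
  | cons a l' ih =>
    intro z fuel seen w hwalk hnd hdis hlen hh
    have haw : a = w := by simpa using hh
    subst haw
    rcases walk_head_step d a l' z hwalk with ⟨y, hy, hcase⟩
    have hcont := step_contains d a y hy
    cases fuel with
    | zero => simp at hlen
    | succ n =>
      have hstep : convertAltOrbit d (n+1) seen a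
          = convertAltOrbit d n (seen ++ [a]) (d.getD a 0) := by
        show (if d.contains a ∧ a ∉ seen then _ else _) = _
        rw [if_pos ⟨hcont, hdis a (List.mem_cons_self)⟩]
      have hgd : d.getD a 0 = y := by
        rw [PySem.Dict.getD_eq_get?_getD, hy]; rfl
      rw [hstep, hgd]
      rcases hcase with ⟨hnil, rfl⟩ | hh'
      · subst hnil
        simp
      · cases l' with
        | nil => cases hh'
        | cons b t =>
          have hby : b = y := by simpa using hh'
          subst hby
          have hrec := ih z n (seen ++ [a]) b
            (walk_suffix d [a] (b :: t) z hwalk)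
            ((List.nodup_cons.mp hnd).2)
            (by
              intro x hx hmem
              rcases List.mem_append.mp hmem with hs | hs
              · exact hdis x (List.mem_cons_of_mem _ hx) hs
              · have : x = a := by simpa using hs
                subst this
                exact (List.nodup_cons.mp hnd).1 hx)
            (by simp at hlen ⊢; omega)
            rfl
          rw [hrec]
          congr 1
          · simp [List.length_cons]
          · simp

theorem orbit_avoid (d : PySem.Dict Int Int) (T : Int → Prop)
    (hcl : ∀ x y, T x → d.get? x = some y → T y) :
    ∀ (fuel : Nat) (seen : List Int) (w : Int), T w →
    T (convertAltOrbit d fuel seen w).2 := by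
  intro fuel
  induction fuel with
  | zero => intro seen w hw; exact hw
  | succ n ih =>
    intro seen w hw
    by_cases hc : d.contains w = true ∧ w ∉ seen
    · have hstep : convertAltOrbit d (n+1) seen w
          = convertAltOrbit d n (seen ++ [w]) (d.getD w 0) := by
        show (if d.contains w ∧ w ∉ seen then _ else _) = _
        rw [if_pos hc]
      rcases contains_some d w hc.1 with ⟨v, hv⟩
      have hgd : d.getD w 0 = v := by rw [PySem.Dict.getD_eq_get?_getD, hv]; rfl
      rw [hstep, hgd]
      exact ih _ _ (hcl w v hw hv)
    · rw [orbit_stop d (n+1) seen w ?_]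
      · exact hw
      · rcases Decidable.not_and_iff_not_or_not.mp hc with h1 | h1
        · exact Or.inl (by revert h1; cases d.contains w <;> simp)
        · exact Or.inr (Decidable.not_not.mp h1)

theorem keys_len_eq_items_len (d : PySem.Dict Int Int) :
    d.keys.length = d.items.length := by
  simp [PySem.Dict.keys]

-- a nodup walk inside the keys has length at most the number of keys
theorem walk_len_le (d : PySem.Dict Int Int) (_hnd : d.keys.Nodup)
    (l : List Int) (z : Int) (h : WalkD d l z) (hl : l.Nodup) :
    l.length ≤ d.items.length := by
  have hsub : l ⊆ d.keys := by
    intro x hx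
    exact (PySem.Dict.contains_iff_mem_keys d x).mp (walk_contains d l z h x hx)
  have := (List.subperm_of_subset hl hsub).length_le
  rwa [keys_len_eq_items_len d] at this

-- ---------- repCheck characterizations ----------

-- a node of a cycle has repCheck true iff it is the minimum of the cycle
theorem rep_on_cycle (d : PySem.Dict Int Int) (hnd : d.keys.Nodup)
    (a : Int) (l : List Int) (h : WalkD d (a :: l) a) (hcnd : (a :: l).Nodup) :
    ∀ x ∈ a :: l, (convertAltRep d x = true ↔ ∀ y ∈ a :: l, x ≤ y) := by
  intro x hx
  rcases List.append_of_mem hx with ⟨l₁, l₂, hsplit⟩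
  have hrot : WalkD d (x :: (l₂ ++ l₁)) x := walk_rotate d a l l₁ l₂ x h hsplit
  have hperm : (a :: l).Perm (x :: (l₂ ++ l₁)) := by
    rw [hsplit]
    calc (l₁ ++ x :: l₂).Perm ((x :: l₂) ++ l₁) := List.perm_append_comm
    _ = (x :: (l₂ ++ l₁)) := by simp
  have hrotnd : (x :: (l₂ ++ l₁)).Nodup := hperm.nodup_iff.mp hcnd
  have hlen : (x :: (l₂ ++ l₁)).length ≤ d.items.length :=
    walk_len_le d hnd _ x hrot hrotnd
  have hrun := orbit_run d (x :: (l₂ ++ l₁)) x (d.items.length + 1) [] x hrot hrotnd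
    (by intro y _ hy; cases hy) (by omega) rfl
  have hstop := orbit_stop d (d.items.length + 1 - (x :: (l₂ ++ l₁)).length)
    ([] ++ (x :: (l₂ ++ l₁))) x (Or.inr (by simp))
  rw [hstop] at hrun
  unfold convertAltRep
  rw [hrun]
  simp only [List.nil_append, decide_eq_true_eq, true_and]
  rw [min?_int_iff]
  constructor
  · intro hmm y hy
    exact hmm.2 y (hperm.mem_iff.mp hy)
  · intro hmin
    exact ⟨List.mem_cons_self, fun y hy => hmin y (hperm.mem_iff.mpr hy)⟩

-- a node whose walk runs into an already-seen node other than itself: repCheck false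
theorem rep_false_of_walk_hit (d : PySem.Dict Int Int) (hnd : d.keys.Nodup)
    (x : Int) (l : List Int) (z : Int) (h : WalkD d (x :: l) z) (hl : (x :: l).Nodup)
    (hz : z ∈ x :: l) (hzx : z ≠ x) : convertAltRep d x = false := by
  have hlen : (x :: l).length ≤ d.items.length := walk_len_le d hnd _ z h hl
  have hrun := orbit_run d (x :: l) z (d.items.length + 1) [] x h hl
    (by intro y _ hy; cases hy) (by omega) rfl
  have hstop := orbit_stop d (d.items.length + 1 - (x :: l).length)
    ([] ++ (x :: l)) z (Or.inr (by simpa using hz))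
  rw [hstop] at hrun
  unfold convertAltRep
  rw [hrun]
  simp [hzx]

theorem rep_false_of_walk_out (d : PySem.Dict Int Int) (hnd : d.keys.Nodup)
    (x : Int) (l : List Int) (z : Int) (h : WalkD d (x :: l) z) (hl : (x :: l).Nodup)
    (hz : z ∉ x :: l) (hstop : d.contains z = false) : convertAltRep d x = false := by
  have hlen : (x :: l).length ≤ d.items.length := walk_len_le d hnd _ z h hl
  have hrun := orbit_run d (x :: l) z (d.items.length + 1) [] x h hl
    (by intro y _ hy; cases hy) (by omega) rfl
  have hstop := orbit_stop d (d.items.length + 1 - (x :: l).length)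
    ([] ++ (x :: l)) z (Or.inl hstop)
  rw [hstop] at hrun
  unfold convertAltRep
  rw [hrun]
  have : z ≠ x := by intro he; exact hz (he ▸ List.mem_cons_self)
  simp [this]

theorem rep_false_of_walk_into_closed (d : PySem.Dict Int Int) (hnd : d.keys.Nodup)
    (V : List Bool) (hcl : ClosureV d V)
    (x : Int) (l : List Int) (z : Int) (h : WalkD d (x :: l) z) (hl : (x :: l).Nodup)
    (_hz : z ∉ x :: l) (hVx : ∀ y ∈ x :: l, bvGet V y = false)
    (hVz : bvGet V z = true) : convertAltRep d x = false := by
  have hlen : (x :: l).length ≤ d.items.length := walk_len_le d hnd _ z h hl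
  have hrun := orbit_run d (x :: l) z (d.items.length + 1) [] x h hl
    (by intro y _ hy; cases hy) (by omega) rfl
  have hT : ∀ p q : Int, (bvGet V p = true ∨ d.contains p = false) → d.get? p = some q →
      (bvGet V q = true ∨ d.contains q = false) := by
    intro p q hp hpq
    rcases hp with hp | hp
    · exact hcl p q hp hpq
    · rw [step_contains d p q hpq] at hp; cases hp
  have havoid := orbit_avoid d (fun p => bvGet V p = true ∨ d.contains p = false) hT
    (d.items.length + 1 - (x :: l).length) ([] ++ (x :: l)) z (Or.inl hVz)
  rw [← hrun] at havoid
  have hxT : ¬ (bvGet V x = true ∨ d.contains x = false) := by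
    rintro (hp | hp)
    · rw [hVx x List.mem_cons_self] at hp; cases hp
    · rcases walk_head_step d x l z h with ⟨y, hy, _⟩
      rw [step_contains d x y hy] at hp; cases hp
  have hne : (convertAltOrbit d (d.items.length + 1) [] x).2 ≠ x := by
    intro he; rw [he] at havoid; exact hxT havoid
  unfold convertAltRep
  simp [hne]

-- ---------- phase 1 ----------

theorem build_keys :
    ∀ (ps : List (Char × Char)) (d₀ d' : PySem.Dict Int Int),
    convertAltBuild ps d₀ = some d' →
    ∀ k ∈ d'.keys, k ∈ d₀.keys ∨ ∃ p ∈ ps, k = (p.1.toNat : Int) - 97 := by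
  intro ps
  induction ps with
  | nil =>
    intro d₀ d' h k hk
    cases h
    exact Or.inl hk
  | cons p ps ih =>
    intro d₀ d' h k hk
    obtain ⟨a, b⟩ := p
    by_cases hne : a ≠ b
    · rw [show convertAltBuild ((a, b) :: ps) d₀
          = (if ((d₀.get? ((a.toNat : Int) - 97)).getD ((b.toNat : Int) - 97) ≠ ((b.toNat : Int) - 97)) then none
             else convertAltBuild ps (d₀.setdefault ((a.toNat : Int) - 97) ((b.toNat : Int) - 97)))
          from by rw [convertAltBuild, if_pos hne]] at h
      by_cases hc : ((d₀.get? ((a.toNat : Int) - 97)).getD ((b.toNat : Int) - 97) ≠ ((b.toNat : Int) - 97))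
      · rw [if_pos hc] at h; cases h
      · rw [if_neg hc] at h
        rcases ih _ _ h k hk with hmem | ⟨q, hq, hkq⟩
        · rw [PySem.Dict.keys_setdefault] at hmem
          by_cases hcont : d₀.contains ((a.toNat : Int) - 97) = true
          · rw [if_pos hcont] at hmem; exact Or.inl hmem
          · rw [if_neg hcont] at hmem
            rcases List.mem_append.mp hmem with hm | hm
            · exact Or.inl hm
            · refine Or.inr ⟨(a, b), List.mem_cons_self, ?_⟩
              simpa using hm
        · exact Or.inr ⟨q, List.mem_cons_of_mem _ hq, hkq⟩
    · rw [show convertAltBuild ((a, b) :: ps) d₀ = convertAltBuild ps d₀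
          from by rw [convertAltBuild, if_neg hne]] at h
      rcases ih _ _ h k hk with hmem | ⟨q, hq, hkq⟩
      · exact Or.inl hmem
      · exact Or.inr ⟨q, List.mem_cons_of_mem _ hq, hkq⟩

theorem build_rel :
    ∀ (cs ts : List Char) (dep : List (Option Int)) (d : PySem.Dict Int Int),
    (∀ c ∈ cs, lcChar c) → (∀ c ∈ ts, lcChar c) → RelDep dep d → GoodD d →
    (convertBuild cs ts dep = none ∧ convertAltBuild (cs.zip ts) d = none) ∨
    (∃ dep' d', convertBuild cs ts dep = some dep' ∧ convertAltBuild (cs.zip ts) d = some d' ∧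
      RelDep dep' d' ∧ GoodD d') := by
  intro cs
  induction cs with
  | nil =>
    intro ts dep d _ _ hrel hgood
    exact Or.inr ⟨dep, d, rfl, rfl, hrel, hgood⟩
  | cons c cs' ih =>
    intro ts dep d hlc hlt hrel hgood
    cases ts with
    | nil => exact Or.inr ⟨dep, d, rfl, rfl, hrel, hgood⟩
    | cons e ts' =>
      have hlcc : lcChar c := hlc c List.mem_cons_self
      have hlce : lcChar e := hlt e List.mem_cons_self
      have hci := res_range c hlcc
      have hti := res_range e hlce
      have hlc' : ∀ x ∈ cs', lcChar x := fun x hx => hlc x (List.mem_cons_of_mem _ hx)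
      have hlt' : ∀ x ∈ ts', lcChar x := fun x hx => hlt x (List.mem_cons_of_mem _ hx)
      have hzip : (c :: cs').zip (e :: ts') = (c, e) :: cs'.zip ts' := rfl
      by_cases hne : ((c.toNat : Int) - 97) ≠ ((e.toNat : Int) - 97)
      · have hce : c ≠ e := (res_inj c e).mp hne
        have hcur : PySem.List.pyGetD dep ((c.toNat : Int) - 97) none
            = d.get? ((c.toNat : Int) - 97) := hrel.2 _ hci.1
        cases hgu : d.get? ((c.toNat : Int) - 97) with
        | none =>
          have hA : convertBuild (c :: cs') (e :: ts') dep
              = convertBuild cs' ts'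
                  (PySem.List.pySetD dep ((c.toNat : Int) - 97) (some ((e.toNat : Int) - 97))) := by
            show (if ((c.toNat : Int) - 97) ≠ ((e.toNat : Int) - 97) then
                    if PySem.List.pyGetD dep ((c.toNat : Int) - 97) none ≠ none ∧
                       PySem.List.pyGetD dep ((c.toNat : Int) - 97) none ≠ some ((e.toNat : Int) - 97) then none
                    else convertBuild cs' ts'
                      (PySem.List.pySetD dep ((c.toNat : Int) - 97) (some ((e.toNat : Int) - 97)))
                  else convertBuild cs' ts' dep) = _
            rw [if_pos hne, if_neg (by rw [hcur, hgu]; simp)]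
          have hB : convertAltBuild ((c :: cs').zip (e :: ts')) d
              = convertAltBuild (cs'.zip ts')
                  (d.setdefault ((c.toNat : Int) - 97) ((e.toNat : Int) - 97)) := by
            rw [hzip]
            show (if c ≠ e then
                    if (d.get? ((c.toNat : Int) - 97)).getD ((e.toNat : Int) - 97) ≠ ((e.toNat : Int) - 97) then none
                    else convertAltBuild (cs'.zip ts')
                      (d.setdefault ((c.toNat : Int) - 97) ((e.toNat : Int) - 97))
                  else convertAltBuild (cs'.zip ts') d) = _
            rw [if_pos hce, if_neg (by rw [hgu]; simp)]
          have hncont : d.contains ((c.toNat : Int) - 97) = false :=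
            (PySem.Dict.get?_eq_none_iff_contains d _).mp hgu
          have hsd := PySem.Dict.setdefault_of_not_contains d ((e.toNat : Int) - 97) hncont
          have hrel' : RelDep
              (PySem.List.pySetD dep ((c.toNat : Int) - 97) (some ((e.toNat : Int) - 97)))
              (d.setdefault ((c.toNat : Int) - 97) ((e.toNat : Int) - 97)) := by
            refine ⟨by rw [PySem.List.length_pySetD]; exact hrel.1, ?_⟩
            intro x hx0
            rw [pyGetD_set_int dep hrel.1 _ x none _ hci.1 hci.2 hx0, hsd,
              PySem.Dict.get?_insert]
            by_cases hxc : x = ((c.toNat : Int) - 97)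
            · rw [if_pos hxc, if_pos hxc]
            · rw [if_neg hxc, if_neg hxc, hrel.2 x hx0]
          have hgood' : GoodD (d.setdefault ((c.toNat : Int) - 97) ((e.toNat : Int) - 97)) := by
            rw [hsd]
            refine ⟨PySem.Dict.nodup_keys_insert d _ _ hgood.1, ?_⟩
            intro k v hkv
            rw [PySem.Dict.get?_insert] at hkv
            by_cases hkc : k = ((c.toNat : Int) - 97)
            · rw [if_pos hkc] at hkv
              cases hkv
              exact ⟨hkc ▸ hci.1, hkc ▸ hci.2, hti.1, hti.2⟩
            · rw [if_neg hkc] at hkv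
              exact hgood.2 k v hkv
          rw [hA, hB]
          exact ih ts' _ _ hlc' hlt' hrel' hgood'
        | some w =>
          by_cases hwv : w ≠ ((e.toNat : Int) - 97)
          · refine Or.inl ⟨?_, ?_⟩
            · show (if ((c.toNat : Int) - 97) ≠ ((e.toNat : Int) - 97) then
                      if PySem.List.pyGetD dep ((c.toNat : Int) - 97) none ≠ none ∧
                         PySem.List.pyGetD dep ((c.toNat : Int) - 97) none ≠ some ((e.toNat : Int) - 97) then none
                      else convertBuild cs' ts'
                        (PySem.List.pySetD dep ((c.toNat : Int) - 97) (some ((e.toNat : Int) - 97)))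
                    else convertBuild cs' ts' dep) = none
              rw [if_pos hne, if_pos (by rw [hcur, hgu]; simp [hwv])]
            · rw [hzip]
              show (if c ≠ e then
                      if (d.get? ((c.toNat : Int) - 97)).getD ((e.toNat : Int) - 97) ≠ ((e.toNat : Int) - 97) then none
                      else convertAltBuild (cs'.zip ts')
                        (d.setdefault ((c.toNat : Int) - 97) ((e.toNat : Int) - 97))
                    else convertAltBuild (cs'.zip ts') d) = none
              rw [if_pos hce, if_pos (by rw [hgu]; simpa using hwv)]
          · have hw : w = ((e.toNat : Int) - 97) := Decidable.not_not.mp hwv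
            subst hw
            have hcont : d.contains ((c.toNat : Int) - 97) = true := step_contains d _ _ hgu
            have hsd := PySem.Dict.setdefault_of_contains d ((e.toNat : Int) - 97) hcont
            have hA : convertBuild (c :: cs') (e :: ts') dep
                = convertBuild cs' ts'
                    (PySem.List.pySetD dep ((c.toNat : Int) - 97) (some ((e.toNat : Int) - 97))) := by
              show (if ((c.toNat : Int) - 97) ≠ ((e.toNat : Int) - 97) then
                      if PySem.List.pyGetD dep ((c.toNat : Int) - 97) none ≠ none ∧
                         PySem.List.pyGetD dep ((c.toNat : Int) - 97) none ≠ some ((e.toNat : Int) - 97) then none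
                      else convertBuild cs' ts'
                        (PySem.List.pySetD dep ((c.toNat : Int) - 97) (some ((e.toNat : Int) - 97)))
                    else convertBuild cs' ts' dep) = _
              rw [if_pos hne, if_neg (by rw [hcur, hgu]; simp)]
            have hB : convertAltBuild ((c :: cs').zip (e :: ts')) d
                = convertAltBuild (cs'.zip ts') d := by
              rw [hzip]
              show (if c ≠ e then
                      if (d.get? ((c.toNat : Int) - 97)).getD ((e.toNat : Int) - 97) ≠ ((e.toNat : Int) - 97) then none
                      else convertAltBuild (cs'.zip ts')
                        (d.setdefault ((c.toNat : Int) - 97) ((e.toNat : Int) - 97))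
                    else convertAltBuild (cs'.zip ts') d) = _
              rw [if_pos hce, if_neg (by rw [hgu]; simp), hsd]
            have hrel' : RelDep
                (PySem.List.pySetD dep ((c.toNat : Int) - 97) (some ((e.toNat : Int) - 97))) d := by
              refine ⟨by rw [PySem.List.length_pySetD]; exact hrel.1, ?_⟩
              intro x hx0
              rw [pyGetD_set_int dep hrel.1 _ x none _ hci.1 hci.2 hx0]
              by_cases hxc : x = ((c.toNat : Int) - 97)
              · rw [if_pos hxc, hxc, hgu]
              · rw [if_neg hxc, hrel.2 x hx0]
            rw [hA, hB]
            exact ih ts' _ _ hlc' hlt' hrel' hgood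
      · have hceq : ¬ (c ≠ e) := fun hce => hne ((res_inj c e).mpr hce)
        have hA : convertBuild (c :: cs') (e :: ts') dep = convertBuild cs' ts' dep := by
          show (if ((c.toNat : Int) - 97) ≠ ((e.toNat : Int) - 97) then
                  if PySem.List.pyGetD dep ((c.toNat : Int) - 97) none ≠ none ∧
                     PySem.List.pyGetD dep ((c.toNat : Int) - 97) none ≠ some ((e.toNat : Int) - 97) then none
                  else convertBuild cs' ts'
                    (PySem.List.pySetD dep ((c.toNat : Int) - 97) (some ((e.toNat : Int) - 97)))
                else convertBuild cs' ts' dep) = _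
          rw [if_neg hne]
        have hB : convertAltBuild ((c :: cs').zip (e :: ts')) d
            = convertAltBuild (cs'.zip ts') d := by
          rw [hzip]
          show (if c ≠ e then
                  if (d.get? ((c.toNat : Int) - 97)).getD ((e.toNat : Int) - 97) ≠ ((e.toNat : Int) - 97) then none
                  else convertAltBuild (cs'.zip ts')
                    (d.setdefault ((c.toNat : Int) - 97) ((e.toNat : Int) - 97))
                else convertAltBuild (cs'.zip ts') d) = _
          rw [if_neg hceq]
        rw [hA, hB]
        exact ih ts' dep d hlc' hlt' hrel hgood

-- ---------- the chase (port A's while loop) ----------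

theorem chase_exit (dep : List (Option Int)) (fuel : Nat) (vis path : List Bool)
    (w np : Int)
    (h : ¬ (PySem.List.pyGetD vis w false = false ∧ PySem.List.pyGetD dep w none ≠ none)) :
    convertChase dep fuel vis path w np = (vis, np, false) := by
  cases fuel with
  | zero => rfl
  | succ n =>
    show (if _ ∧ _ then _ else (vis, np, false)) = (vis, np, false)
    rw [if_neg h]

theorem head?_append_left (L : List Int) (w : Int) (rest : List Int) :
    ((L ++ [w]) ++ rest).head? = (L ++ [w]).head? := by
  cases L <;> simp

-- master invariant lemma for the while loop
theorem chase_master (d : PySem.Dict Int Int) (dep : List (Option Int))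
    (hrel : RelDep dep d) (hgood : GoodD d)
    (V : List Bool) (u0 : Int) :
    ∀ (fuel : Nat) (L : List Int) (vis path : List Bool) (w np : Int),
    unvis vis < fuel →
    vis.length = 26 → (∀ x : Int, 0 ≤ x → bvGet vis x = (bvGet V x || decide (x ∈ L))) →
    path.length = 26 → (∀ x : Int, 0 ≤ x → bvGet path x = (decide (x ∈ L) || decide (x = w))) →
    WalkD d L w → (L ++ [w]).head? = some u0 →
    (L ++ [w]).Nodup →
    (∀ x ∈ L, bvGet V x = false) →
    (∀ x ∈ L ++ [w], 0 ≤ x ∧ x < 26) →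
    (∃ S z vis',
      convertChase dep fuel vis path w np = (vis', np, false) ∧
      vis'.length = 26 ∧
      (∀ x : Int, 0 ≤ x → bvGet vis' x = (bvGet V x || decide (x ∈ L ++ S))) ∧
      WalkD d (L ++ S) z ∧ ((L ++ S) ++ [z]).head? = some u0 ∧
      (L ++ S).Nodup ∧ z ∉ L ++ S ∧
      (∀ x ∈ L ++ S, bvGet V x = false) ∧
      (∀ x ∈ (L ++ S) ++ [z], 0 ≤ x ∧ x < 26) ∧
      (bvGet V z = true ∨ d.get? z = none)) ∨
    (∃ S dest vis',
      convertChase dep fuel vis path w np = (vis', np - 1, decide (np - 1 < 0)) ∧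
      vis'.length = 26 ∧
      (∀ x : Int, 0 ≤ x → bvGet vis' x = (bvGet V x || decide (x ∈ L ++ S))) ∧
      WalkD d (L ++ S) dest ∧ ((L ++ S) ++ [dest]).head? = some u0 ∧
      (L ++ S).Nodup ∧ dest ∈ L ++ S ∧
      (∀ x ∈ L ++ S, bvGet V x = false) ∧
      (∀ x ∈ L ++ S, 0 ≤ x ∧ x < 26)) := by
  intro fuel
  induction fuel with
  | zero => intro L vis path w np hfuel; omega
  | succ f ih =>
    intro L vis path w np hfuel hvlen hvs hplen hps hwalk hhead hnd hLV hrange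
    have hw0 : 0 ≤ w ∧ w < 26 := hrange w (List.mem_append.mpr (Or.inr List.mem_cons_self))
    have hwnL : w ∉ L := by
      intro hmem
      rcases List.nodup_append.mp hnd with ⟨_, _, hdisj⟩
      exact hdisj w hmem w (by simp) rfl
    have hvisw : PySem.List.pyGetD vis w false = bvGet V w := by
      have h := hvs w hw0.1
      rw [show bvGet vis w = PySem.List.pyGetD vis w false from rfl] at h
      rw [h]
      simp [hwnL]
    have hdepw : PySem.List.pyGetD dep w none = d.get? w := hrel.2 w hw0.1
    by_cases hVw : bvGet V w = true
    · -- already visited: loop does not run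
      refine Or.inl ⟨[], w, vis, ?_, hvlen, ?_, ?_, ?_, ?_, ?_, ?_, ?_, Or.inl hVw⟩
      · exact chase_exit dep (f+1) vis path w np (by rw [hvisw, hVw]; simp)
      · intro x hx; rw [List.append_nil]; exact hvs x hx
      · rw [List.append_nil]; exact hwalk
      · rw [List.append_nil]; exact hhead
      · rw [List.append_nil]; exact (List.nodup_append.mp hnd).1
      · rw [List.append_nil]; exact hwnL
      · rw [List.append_nil]; exact hLV
      · rw [List.append_nil]; exact hrange
    · have hVwf : bvGet V w = false := by revert hVw; cases bvGet V w <;> simp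
      cases hgw : d.get? w with
      | none =>
        refine Or.inl ⟨[], w, vis, ?_, hvlen, ?_, ?_, ?_, ?_, ?_, ?_, ?_, Or.inr hgw⟩
        · exact chase_exit dep (f+1) vis path w np (by rw [hdepw, hgw]; simp)
        · intro x hx; rw [List.append_nil]; exact hvs x hx
        · rw [List.append_nil]; exact hwalk
        · rw [List.append_nil]; exact hhead
        · rw [List.append_nil]; exact (List.nodup_append.mp hnd).1
        · rw [List.append_nil]; exact hwnL
        · rw [List.append_nil]; exact hLV
        · rw [List.append_nil]; exact hrange
      | some v =>
        obtain ⟨hk0, hk26, hv0, hvlt⟩ := hgood.2 w v hgw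
        have hC : PySem.List.pyGetD vis w false = false ∧
            PySem.List.pyGetD dep w none ≠ none := by
          rw [hvisw, hVwf, hdepw, hgw]; simp
        have hdest : (PySem.List.pyGetD dep w none).getD 0 = v := by rw [hdepw, hgw]; rfl
        have hstep : convertChase dep (f+1) vis path w np =
            (if PySem.List.pyGetD path ((PySem.List.pyGetD dep w none).getD 0) false then
               (if np - 1 < 0 then (PySem.List.pySetD vis w true, np - 1, true)
                else convertChase dep f (PySem.List.pySetD vis w true) path
                  ((PySem.List.pyGetD dep w none).getD 0) (np - 1))
             else convertChase dep f (PySem.List.pySetD vis w true)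
               (PySem.List.pySetD path ((PySem.List.pyGetD dep w none).getD 0) true)
               ((PySem.List.pyGetD dep w none).getD 0) np) := by
          show (if _ ∧ _ then _ else _) = _
          rw [if_pos hC]
        rw [hdest] at hstep
        have hpathv : PySem.List.pyGetD path v false
            = (decide (v ∈ L) || decide (v = w)) := hps v hv0
        have hwalk' : WalkD d (L ++ [w]) v := walk_snoc d L w v hwalk hgw
        have hvs' : ∀ x : Int, 0 ≤ x →
            bvGet (PySem.List.pySetD vis w true) x
              = (bvGet V x || decide (x ∈ L ++ [w])) := by
          intro x hx0
          rw [bv_set vis hvlen w x hw0.1 hw0.2 hx0]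
          by_cases hxw : x = w
          · subst hxw; simp
          · rw [if_neg hxw, hvs x hx0]
            simp [hxw]
        have hvlen' : (PySem.List.pySetD vis w true).length = 26 := by
          rw [PySem.List.length_pySetD]; exact hvlen
        have hLVw : ∀ x ∈ L ++ [w], bvGet V x = false := by
          intro x hx
          rcases List.mem_append.mp hx with hx | hx
          · exact hLV x hx
          · have : x = w := by simpa using hx
            subst this; exact hVwf
        by_cases hhit : v ∈ L ∨ v = w
        · -- cycle detected
          have hpath : PySem.List.pyGetD path v false = true := by
            rw [hpathv]
            rcases hhit with h | h <;> simp [h]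
          rw [hstep, if_pos hpath]
          refine Or.inr ⟨[w], v, PySem.List.pySetD vis w true, ?_, hvlen', hvs', hwalk', ?_, hnd,
            (by rcases hhit with h | h
                · exact List.mem_append.mpr (Or.inl h)
                · subst h; exact List.mem_append.mpr (Or.inr List.mem_cons_self)), hLVw, ?_⟩
          · by_cases hnp1 : np - 1 < 0
            · rw [if_pos hnp1]
              congr 2
              simp [hnp1]
            · rw [if_neg hnp1]
              rw [chase_exit dep f _ path v (np - 1) ?_]
              · congr 2
                simp [hnp1]
              · intro hcc
                have hvv : bvGet (PySem.List.pySetD vis w true) v = false := hcc.1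
                rw [hvs' v hv0] at hvv
                rcases hhit with h | h
                · simp [h] at hvv
                · simp [h] at hvv
          · rw [head?_append_left]; exact hhead
          · intro x hx
            rcases List.mem_append.mp hx with hx | hx
            · exact hrange x (List.mem_append.mpr (Or.inl hx))
            · have : x = w := by simpa using hx
              subst this; exact hw0
        · -- walk on
          rw [not_or] at hhit
          have hpath : PySem.List.pyGetD path v false = false := by
            rw [hpathv]; simp [hhit.1, hhit.2]
          rw [hstep, if_neg (by rw [hpath]; simp)]
          have hnd' : ((L ++ [w]) ++ [v]).Nodup := by
            rw [List.nodup_append]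
            refine ⟨hnd, List.nodup_singleton _, ?_⟩
            intro x hx b hb
            have hbv : b = v := by simpa using hb
            subst hbv
            intro hxe
            subst hxe
            rcases List.mem_append.mp hx with hx | hx
            · exact hhit.1 hx
            · exact hhit.2 (by simpa using hx)
          have hps' : ∀ x : Int, 0 ≤ x →
              bvGet (PySem.List.pySetD path v true) x
                = (decide (x ∈ L ++ [w]) || decide (x = v)) := by
            intro x hx0
            rw [bv_set path hplen v x hv0 hvlt hx0]
            by_cases hxv : x = v
            · subst hxv; simp
            · rw [if_neg hxv, hps x hx0]
              by_cases hxw : x = w <;> simp [hxv, hxw]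
          have hrange' : ∀ x ∈ (L ++ [w]) ++ [v], 0 ≤ x ∧ x < 26 := by
            intro x hx
            rcases List.mem_append.mp hx with hx | hx
            · rcases List.mem_append.mp hx with hx | hx
              · exact hrange x (List.mem_append.mpr (Or.inl hx))
              · have : x = w := by simpa using hx
                subst this; exact hw0
            · have : x = v := by simpa using hx
              subst this; exact ⟨hv0, hvlt⟩
          have hfuel' : unvis (PySem.List.pySetD vis w true) < f := by
            have := unvis_dec vis hvlen w hw0.1 hw0.2 (by rw [← hvisw] at hVwf; exact hVwf)
            omega
          have hrec := ih (L ++ [w]) (PySem.List.pySetD vis w true)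
            (PySem.List.pySetD path v true) v np hfuel' hvlen' hvs' (by
              rw [PySem.List.length_pySetD]; exact hplen) hps' hwalk'
            (by rw [head?_append_left]; exact hhead) hnd' hLVw hrange'
          rcases hrec with ⟨S, z, vis', h1, h2, h3, h4, h5, h6, h7, h8, h9, h10⟩ |
            ⟨S, dst, vis', h1, h2, h3, h4, h5, h6, h7, h8, h9⟩
          · have hEq : L ++ w :: S = (L ++ [w]) ++ S := by simp
            refine Or.inl ⟨w :: S, z, vis', ?_, h2, ?_, ?_, ?_, ?_, ?_, ?_, ?_, h10⟩
            · rw [← h1]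
            · intro x hx0; rw [hEq]; exact h3 x hx0
            · rw [show WalkD d (L ++ w :: S) z = WalkD d ((L ++ [w]) ++ S) z from by rw [hEq]]
              exact h4
            · rw [hEq]; exact h5
            · rw [hEq]; exact h6
            · rw [hEq]; exact h7
            · rw [hEq]; exact h8
            · rw [hEq]; exact h9
          · have hEq : L ++ w :: S = (L ++ [w]) ++ S := by simp
            refine Or.inr ⟨w :: S, dst, vis', ?_, h2, ?_, ?_, ?_, ?_, ?_, ?_, ?_⟩
            · rw [← h1]
            · intro x hx0; rw [hEq]; exact h3 x hx0
            · rw [show WalkD d (L ++ w :: S) dst = WalkD d ((L ++ [w]) ++ S) dst from by rw [hEq]]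
              exact h4
            · rw [hEq]; exact h5
            · rw [hEq]; exact h6
            · rw [hEq]; exact h7
            · rw [hEq]; exact h8
            · rw [hEq]; exact h9


-- consequences of one chase, in the terms the outer loop needs
theorem chase_cor (d : PySem.Dict Int Int) (dep : List (Option Int))
    (hrel : RelDep dep d) (hgood : GoodD d)
    (V : List Bool) (hV : V.length = 26) (hcl : ClosureV d V)
    (u0 : Int) (h0 : 0 ≤ u0) (h26 : u0 < 26) (np : Int) :
    ∃ (vis' : List Bool) (hit : Bool),
      convertChase dep 27 V (PySem.List.pySetD (List.replicate 26 false) u0 true) u0 np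
        = (vis', np - (if hit then 1 else 0), if hit then decide (np - 1 < 0) else false) ∧
      vis'.length = 26 ∧ ClosureV d vis' ∧
      (∀ x : Int, 0 ≤ x → bvGet V x = true → bvGet vis' x = true) ∧
      (cyclesLeftN d V = cyclesLeftN d vis' + (if hit then 1 else 0)) ∧
      (bvGet vis' u0 = true ∨ bvGet V u0 = true ∨ d.get? u0 = none) := by
  have hmaster := chase_master d dep hrel hgood V u0 27 [] V
    (PySem.List.pySetD (List.replicate 26 false) u0 true) u0 np
    (by have := unvis_le V; omega) hV
    (by intro x hx; simp)
    (by rw [PySem.List.length_pySetD]; simp)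
    (by
      intro x hx0
      rw [bv_set (List.replicate 26 false) (by simp) u0 x h0 h26 hx0]
      by_cases hxu : x = u0
      · simp [hxu]
      · rw [if_neg hxu, bv_replicate26]
        simp [hxu])
    (List.isChain_singleton u0)
    (by simp)
    (by simp)
    (by intro x hx; cases hx)
    (by
      intro x hx
      have : x = u0 := by simpa using hx
      subst this; exact ⟨h0, h26⟩)
  have hkb : ∀ k ∈ d.keys, 0 ≤ k := by
    intro k hk
    rcases contains_some d k ((PySem.Dict.contains_iff_mem_keys d k).mpr hk) with ⟨v, hv⟩
    exact (hgood.2 k v hv).1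
  rcases hmaster with ⟨S, z, vis', hres, hlen', hsem, hwalkS, hheadS, hndS, hznS, hdisjS,
      hrangeS, hstop⟩ | ⟨S, dst, vis', hres, hlen', hsem, hwalkS, hheadS, hndS, hdstS,
      hdisjS, hrangeS⟩
  -- NOHIT
  · simp only [List.nil_append] at hres hsem hwalkS hheadS hndS hdisjS hrangeS hznS
    have hrepS : ∀ x ∈ S, convertAltRep d x = false := by
      intro x hxS
      rcases List.append_of_mem hxS with ⟨s1, t1, rfl⟩
      have hwsuf : WalkD d (x :: t1) z := walk_suffix d s1 _ z hwalkS
      have hndsuf : (x :: t1).Nodup := (List.nodup_append.mp hndS).2.1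
      have hsub : ∀ y ∈ x :: t1, y ∈ s1 ++ x :: t1 := by
        intro y hy; exact List.mem_append.mpr (Or.inr hy)
      have hznsuf : z ∉ x :: t1 := fun hm => hznS (hsub z hm)
      rcases hstop with hVz | hgz
      · exact rep_false_of_walk_into_closed d hgood.1 V hcl x t1 z hwsuf hndsuf hznsuf
          (fun y hy => hdisjS y (hsub y hy)) hVz
      · exact rep_false_of_walk_out d hgood.1 x t1 z hwsuf hndsuf hznsuf
          ((PySem.Dict.get?_eq_none_iff_contains d z).mp hgz)
    refine ⟨vis', false, by simpa using hres, hlen', ?_, ?_, ?_, ?_⟩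
    · intro x y hx hy
      obtain ⟨hx0, _, hy0, _⟩ := hgood.2 x y hy
      rw [hsem x hx0] at hx
      rcases Bool.or_eq_true_iff.mp hx with hx | hx
      · rcases hcl x y hx hy with h | h
        · left; rw [hsem y hy0, h]; simp
        · exact Or.inr h
      · have hxS : x ∈ S := of_decide_eq_true hx
        rcases walk_succ d S z hwalkS x hxS with ⟨y', hy', hcase⟩
        rw [hy] at hy'
        cases hy'
        rcases hcase with hyS | hyz
        · left; rw [hsem y hy0]; simp [hyS]
        · subst hyz
          rcases hstop with hVz | hgz
          · left; rw [hsem y hy0, hVz]; simp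
          · exact Or.inr ((PySem.Dict.get?_eq_none_iff_contains d y).mp hgz)
    · intro x hx0 hVx
      rw [hsem x hx0, hVx]; simp
    · show cyclesLeftN d V = cyclesLeftN d vis' + (if (false : Bool) then 1 else 0)
      rw [if_neg (by simp), Nat.add_zero]
      unfold cyclesLeftN
      apply List.countP_congr
      intro u hu
      cases hrep : convertAltRep d u
      · simp
      · have huS : u ∉ S := by
          intro hm
          rw [hrepS u hm] at hrep
          cases hrep
        rw [hsem u (hkb u hu)]
        simp [huS]
    · cases S with
      | nil =>
        have : z = u0 := by simpa using hheadS
        subst this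
        rcases hstop with h | h
        · exact Or.inr (Or.inl h)
        · exact Or.inr (Or.inr h)
      | cons s S' =>
        have hsu : s = u0 := by simpa using hheadS
        left
        rw [hsem u0 h0, ← hsu]
        simp
  -- HIT
  · simp only [List.nil_append] at hres hsem hwalkS hheadS hndS hdisjS hrangeS hdstS
    have hSne : S ≠ [] := fun he => by rw [he] at hdstS; cases hdstS
    rcases List.append_of_mem hdstS with ⟨T1, C1, hsplit⟩
    have hcy : WalkD d (dst :: C1) dst := by
      rw [hsplit] at hwalkS
      exact walk_suffix d T1 _ dst hwalkS
    have hndS' := hndS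
    rw [hsplit] at hndS'
    have hndcy : (dst :: C1).Nodup := (List.nodup_append.mp hndS').2.1
    have hrepcy := rep_on_cycle d hgood.1 dst C1 hcy hndcy
    cases hmn : PySem.List.min? (dst :: C1) id with
    | none => exact absurd ((PySem.List.min?_eq_none_iff _ id).mp hmn) (by simp)
    | some m =>
    have hmcy : m ∈ dst :: C1 := PySem.List.min?_mem hmn
    have hmmin : ∀ y ∈ dst :: C1, m ≤ y := by
      intro y hy
      simpa using PySem.List.min?_isMin hmn y hy
    have hmS : m ∈ S := by rw [hsplit]; exact List.mem_append.mpr (Or.inr hmcy)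
    have hrepm : convertAltRep d m = true := (hrepcy m hmcy).mpr hmmin
    have hrepT : ∀ x ∈ T1, convertAltRep d x = false := by
      intro x hxT
      rcases List.append_of_mem hxT with ⟨p, q, hpq⟩
      have hsuf : WalkD d (x :: (q ++ dst :: C1)) dst := by
        rw [hsplit, hpq] at hwalkS
        have hre : p ++ (x :: (q ++ dst :: C1)) = (p ++ x :: q) ++ dst :: C1 := by simp
        exact walk_suffix d p _ dst (by rw [hre]; exact hwalkS)
      have hndsuf : (x :: (q ++ dst :: C1)).Nodup := by
        rw [hsplit, hpq] at hndS
        have hre : (p ++ x :: q) ++ dst :: C1 = p ++ (x :: (q ++ dst :: C1)) := by simp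
        rw [hre] at hndS
        exact (List.nodup_append.mp hndS).2.1
      have hdm : dst ∈ x :: (q ++ dst :: C1) := by simp
      have hdx : dst ≠ x := by
        intro he
        subst he
        rcases List.nodup_cons.mp hndsuf with ⟨hnin, _⟩
        exact hnin (by simp)
      exact rep_false_of_walk_hit d hgood.1 x _ dst hsuf hndsuf hdm hdx
    have hrepuniq : ∀ x ∈ S, convertAltRep d x = true → x = m := by
      intro x hxS hrep
      rw [hsplit] at hxS
      rcases List.mem_append.mp hxS with hxT | hxC
      · rw [hrepT x hxT] at hrep; cases hrep
      · have h1 := (hrepcy x hxC).mp hrep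
        exact le_antisymm (h1 m hmcy) (hmmin x hxC)
    have hmkeys : m ∈ d.keys := by
      apply (PySem.Dict.contains_iff_mem_keys d m).mp
      exact walk_contains d _ dst hcy m hmcy
    refine ⟨vis', true, by simpa using hres, hlen', ?_, ?_, ?_, ?_⟩
    · intro x y hx hy
      obtain ⟨hx0, _, hy0, _⟩ := hgood.2 x y hy
      rw [hsem x hx0] at hx
      rcases Bool.or_eq_true_iff.mp hx with hx | hx
      · rcases hcl x y hx hy with h | h
        · left; rw [hsem y hy0, h]; simp
        · exact Or.inr h
      · have hxS : x ∈ S := of_decide_eq_true hx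
        rcases walk_succ d S dst hwalkS x hxS with ⟨y', hy', hcase⟩
        rw [hy] at hy'
        cases hy'
        have hyS : y ∈ S := by
          rcases hcase with h | h
          · exact h
          · subst h; exact hdstS
        left; rw [hsem y hy0]; simp [hyS]
    · intro x hx0 hVx
      rw [hsem x hx0, hVx]; simp
    · show cyclesLeftN d V = cyclesLeftN d vis' + (if (true : Bool) then 1 else 0)
      rw [if_pos rfl]
      unfold cyclesLeftN
      have hflip := countP_flip d.keys hgood.1 m hmkeys
        (fun u => convertAltRep d u && !bvGet V u)
        (fun u => convertAltRep d u && !bvGet vis' u)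
        (by
          have hbv : bvGet V m = false := hdisjS m hmS
          simp [hrepm, hbv])
        (by
          have hbv : bvGet vis' m = true := by
            rw [hsem m (hkb m hmkeys)]
            simp [hmS]
          simp [hrepm, hbv])
        (by
          intro u hu hum
          cases hrep : convertAltRep d u
          · simp [hrep]
          · have huS : u ∉ S := by
              intro hm
              exact hum (hrepuniq u hm hrep)
            show (convertAltRep d u && !bvGet V u) = (convertAltRep d u && !bvGet vis' u)
            rw [hsem u (hkb u hu)]
            simp [huS])
      exact hflip
    · left
      cases S with
      | nil => exact absurd rfl hSne
      | cons s S' =>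
        have hsu : s = u0 := by
          have hh : ((s :: S') ++ [dst]).head? = some u0 := hheadS
          simpa using hh
        rw [hsem u0 h0, ← hsu]
        simp

-- ---------- the outer loop ----------

theorem outer_eq (d : PySem.Dict Int Int) (dep : List (Option Int))
    (hrel : RelDep dep d) (hgood : GoodD d) :
    ∀ (cs : List Char) (V : List Bool) (np : Int),
    (∀ c ∈ cs, lcChar c) → V.length = 26 → ClosureV d V → 0 ≤ np →
    (∀ k ∈ d.keys, bvGet V k = false → ∃ c ∈ cs, (c.toNat : Int) - 97 = k) →
    convertOuter dep cs V np = decide ((cyclesLeftN d V : Int) ≤ np) := by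
  intro cs
  induction cs with
  | nil =>
    intro V np hlc hV hcl hnp hcov
    have hz : cyclesLeftN d V = 0 := by
      unfold cyclesLeftN
      rw [List.countP_eq_zero]
      intro k hk
      cases hbv : bvGet V k with
      | false => exact absurd (hcov k hk hbv) (by simp)
      | true => simp
    show true = _
    rw [hz]
    symm
    rw [decide_eq_true_iff]
    exact_mod_cast hnp
  | cons c cs ih =>
    intro V np hlc hV hcl hnp hcov
    have hlcc : lcChar c := hlc c List.mem_cons_self
    have hr := res_range c hlcc
    obtain ⟨vis', hit, hres, hlen', hclos', hmono, hcount, hu0⟩ :=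
      chase_cor d dep hrel hgood V hV hcl ((c.toNat : Int) - 97) hr.1 hr.2 np
    have hkey : ∀ k ∈ d.keys, d.get? k ≠ none := by
      intro k hk
      rcases contains_some d k ((PySem.Dict.contains_iff_mem_keys d k).mpr hk) with ⟨v, hv⟩
      rw [hv]
      simp
    have hkb : ∀ k ∈ d.keys, 0 ≤ k := by
      intro k hk
      rcases contains_some d k ((PySem.Dict.contains_iff_mem_keys d k).mpr hk) with ⟨v, hv⟩
      exact (hgood.2 k v hv).1
    have hcov' : ∀ k ∈ d.keys, bvGet vis' k = false → ∃ c' ∈ cs, (c'.toNat : Int) - 97 = k := by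
      intro k hk hkv
      have hkV : bvGet V k = false := by
        cases hbv : bvGet V k with
        | false => rfl
        | true =>
          rw [hmono k (hkb k hk) hbv] at hkv
          cases hkv
      rcases hcov k hk hkV with ⟨c', hc', hresc⟩
      rcases List.mem_cons.mp hc' with hcc | hcc
      · subst hcc
        rcases hu0 with h | h | h
        · rw [hresc] at h; rw [h] at hkv; cases hkv
        · rw [hresc] at h; rw [h] at hkV; cases hkV
        · rw [hresc] at h; exact absurd h (hkey k hk)
      · exact ⟨c', hcc, hresc⟩
    have hun : convertOuter dep (c :: cs) V np
        = (match convertChase dep 27 V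
            (PySem.List.pySetD (List.replicate 26 false) ((c.toNat : Int) - 97) true)
            ((c.toNat : Int) - 97) np with
           | (visited', np', early) =>
             if early then false else convertOuter dep cs visited' np') := rfl
    rw [hun, hres]
    cases hit with
    | false =>
      show (if false then false else convertOuter dep cs vis' (np - 0)) = _
      rw [if_neg (by simp)]
      have hnp' : np - 0 = np := by omega
      rw [hnp', ih vis' np (fun x hx => hlc x (List.mem_cons_of_mem _ hx)) hlen' hclos' hnp hcov']
      rw [show cyclesLeftN d V = cyclesLeftN d vis' + (if (false : Bool) then 1 else 0) from hcount,
        if_neg (by simp), Nat.add_zero]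
    | true =>
      have hcnt : cyclesLeftN d V = cyclesLeftN d vis' + 1 := by
        rw [show cyclesLeftN d V = cyclesLeftN d vis' + (if (true : Bool) then 1 else 0) from hcount,
          if_pos rfl]
      by_cases hnp1 : np - 1 < 0
      · show (if decide (np - 1 < 0) then false else convertOuter dep cs vis' (np - 1)) = _
        rw [if_pos (by simpa using hnp1)]
        symm
        rw [decide_eq_false_iff_not]
        intro hle
        rw [hcnt] at hle
        have : ((cyclesLeftN d vis' + 1 : Nat) : Int) ≤ np := hle
        push_cast at this
        omega
      · show (if decide (np - 1 < 0) then false else convertOuter dep cs vis' (np - 1)) = _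
        rw [if_neg (by simpa using hnp1)]
        rw [ih vis' (np - 1) (fun x hx => hlc x (List.mem_cons_of_mem _ hx)) hlen' hclos'
          (by omega) hcov']
        rw [hcnt]
        simp only [decide_eq_decide]
        push_cast
        omega

theorem count_eq (d : PySem.Dict Int Int) :
    convertAltCount d = ((d.keys.countP (convertAltRep d) : Nat) : Int) := by
  unfold convertAltCount
  rw [PySem.List.foldl_count_if]
  simp

theorem cyclesLeft_init (d : PySem.Dict Int Int) :
    cyclesLeftN d (List.replicate 26 false) = d.keys.countP (convertAltRep d) := by
  unfold cyclesLeftN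
  apply List.countP_congr
  intro x _
  rw [bv_replicate26]
  simp

-- ===== VERDICT (by name: the statement is the Claim_ definition above) =====
theorem convert_spec : Claim_equal_convert := by
  intro s t _ hpre
  unfold Spec_convert
  by_cases hlen : PySem.Str.len s ≠ PySem.Str.len t
  · unfold convert convert_alt
    rw [if_pos hlen, if_pos hlen]
  · have hlc : ∀ c ∈ s.toList ++ t.toList, lcChar c := by
      rcases hpre with h | h
      · exact absurd h hlen
      · intro c hc
        have := List.all_eq_true.mp h c hc
        unfold lcChar
        simp only [Bool.and_eq_true, decide_eq_true_eq] at this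
        omega
    have hlcs : ∀ c ∈ s.toList, lcChar c := fun c hc => hlc c (List.mem_append.mpr (Or.inl hc))
    have hlct : ∀ c ∈ t.toList, lcChar c := fun c hc => hlc c (List.mem_append.mpr (Or.inr hc))
    have hget0 : ∀ x : Int, PySem.List.pyGetD (List.replicate 26 (none : Option Int)) x none = none := by
      intro x
      unfold PySem.List.pyGetD
      cases hx : PySem.List.pyGet? (List.replicate 26 (none : Option Int)) x with
      | none => rfl
      | some b =>
        have hb := PySem.List.mem_of_pyGet?_eq_some _ hx
        rw [List.eq_of_mem_replicate hb]
        rfl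
    have hrel0 : RelDep (List.replicate 26 none) PySem.Dict.empty := by
      refine ⟨by simp, ?_⟩
      intro x _
      rw [hget0 x, PySem.Dict.get?_empty]
    have hgood0 : GoodD PySem.Dict.empty := by
      refine ⟨PySem.Dict.nodup_keys_empty, ?_⟩
      intro k v h
      rw [PySem.Dict.get?_empty] at h
      cases h
    rcases build_rel s.toList t.toList _ _ hlcs hlct hrel0 hgood0 with
      ⟨hA, hB⟩ | ⟨dep, dd, hA, hB, hrel, hgood⟩
    · unfold convert convert_alt
      rw [if_neg hlen, if_neg hlen, hA, hB]
    · unfold convert convert_alt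
      rw [if_neg hlen, if_neg hlen, hA, hB]
      have huninodup : (PySem.Set.ofList s.toList).Nodup := PySem.Set.nodup_ofList s.toList
      have hunilc : ∀ c ∈ PySem.Set.ofList s.toList, lcChar c := by
        intro c hc
        exact hlcs c ((PySem.Set.mem_ofList _ _).mp hc)
      have hle26 := nodup_lc_le26 _ huninodup hunilc
      have hnp0 : (0 : Int) ≤ 26 - ((PySem.Set.ofList s.toList).length : Int) := by
        have : ((PySem.Set.ofList s.toList).length : Int) ≤ 26 := by exact_mod_cast hle26
        omega
      have hcov : ∀ k ∈ dd.keys, bvGet (List.replicate 26 false) k = false →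
          ∃ c ∈ PySem.Set.ofList s.toList, (c.toNat : Int) - 97 = k := by
        intro k hk _
        rcases build_keys (s.toList.zip t.toList) PySem.Dict.empty dd hB k hk with h | ⟨p, hp, hkp⟩
        · cases h
        · obtain ⟨a, b⟩ := p
          have hmem := (List.of_mem_zip hp).1
          exact ⟨a, (PySem.Set.mem_ofList _ _).mpr hmem, hkp.symm⟩
      have houter := outer_eq dd dep hrel hgood (PySem.Set.ofList s.toList)
        (List.replicate 26 false) (26 - ((PySem.Set.ofList s.toList).length : Int))
        hunilc (by simp)
        (by
          intro x y hx _
          rw [bv_replicate26] at hx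
          cases hx)
        hnp0 hcov
      show convertOuter dep (PySem.Set.ofList s.toList) (List.replicate 26 false)
          (26 - ((PySem.Set.ofList s.toList).length : Int))
        = decide (convertAltCount dd ≤ 26 - ((PySem.Set.ofList s.toList).length : Int))
      rw [houter, cyclesLeft_init, count_eq]
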